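-- pv_equiv track=rewrite | github.com/hoodmane/py_steenrod | src/combinatorics.py | multinomial_2
-- ===== SOURCE A (Python) =====
-- def multinomial_2(l):
--     bit_or = 0
--     sum = 0
--     for v in l:
--         sum += v
--         bit_or |= v
--         if bit_or < sum:
--             return 0
--     return 1
-- ===== SOURCE B (Python) =====
-- def multinomial_2(l):
--     def ok(seg, s, o):
--         # returns (all-prefixes-survive?, final sum, final bitwise or)
--         if not seg:
--             return (True, s, o)
--         if len(seg) == 1:
--             v = seg[0]
--             return (o | v >= s + v, s + v, o | v)
--         m = len(seg) // 2
--         good, s, o = ok(seg[:m], s, o)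
--         if not good:
--             return (False, s, o)
--         return ok(seg[m:], s, o)
--     return 1 if ok(l, 0, 0)[0] else 0
-- ===== Notes on version B (the rewrite author's own statement) =====
-- stated objective: alternative
-- what changed: Replaces A's linear accumulator loop with early return by a divide-and-conquer recursion that splits the list in half, checks the left half, threads the final (sum, bitwise-or) state into the right half, and short-circuits when the left half fails.
import Mathlib
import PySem

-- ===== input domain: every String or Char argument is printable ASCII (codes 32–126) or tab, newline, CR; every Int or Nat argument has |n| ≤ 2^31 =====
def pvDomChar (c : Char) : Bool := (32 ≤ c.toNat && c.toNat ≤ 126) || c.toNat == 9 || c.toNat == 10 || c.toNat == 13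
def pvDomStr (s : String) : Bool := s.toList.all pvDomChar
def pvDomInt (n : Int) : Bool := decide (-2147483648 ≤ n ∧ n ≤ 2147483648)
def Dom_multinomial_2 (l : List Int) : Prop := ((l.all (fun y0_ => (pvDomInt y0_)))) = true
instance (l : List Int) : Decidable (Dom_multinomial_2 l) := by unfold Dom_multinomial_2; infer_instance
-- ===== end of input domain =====

-- B replaces A's linear early-exit accumulator loop by a divide-and-conquer
-- recursion: split in half, check the left half, thread the final (sum, or)
-- state into the right half, short-circuit on failure; objective: alternative.

-- ===== PORT A =====
-- A's for-loop with running `sum`, `bit_or` and early `return 0`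
def multinomial_2_loop : Int → Int → List Int → Int
  | _, _, [] => 1
  | bo, s, v :: rest =>
    let s' := s + v
    let bo' := PySem.Int.bor bo v
    if bo' < s' then 0 else multinomial_2_loop bo' s' rest

def multinomial_2 (l : List Int) : Int := multinomial_2_loop 0 0 l

-- ===== PORT B =====
-- Source B's inner ok(seg, s, o): (survives?, final sum, final bitwise or)
def multinomial_2_ok (seg : List Int) (s o : Int) : Bool × Int × Int :=
  match seg with
  | [] => (true, s, o)
  | [v] => (decide (PySem.Int.bor o v ≥ s + v), s + v, PySem.Int.bor o v)
  | a :: b :: rest =>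
    let m := PySem.Int.floordiv (((a :: b :: rest).length : Int)) 2
    let r1 := multinomial_2_ok (PySem.List.slice (a :: b :: rest) none (some m)) s o
    if r1.1 then
      multinomial_2_ok (PySem.List.slice (a :: b :: rest) (some m) none) r1.2.1 r1.2.2
    else (false, r1.2.1, r1.2.2)
termination_by seg.length
decreasing_by
  · rw [show PySem.Int.floordiv (((a :: b :: rest).length : Int)) 2
        = (((a :: b :: rest).length / 2 : Nat) : Int) by
        exact_mod_cast PySem.Int.floordiv_natCast (a :: b :: rest).length 2,
      PySem.List.slice_to_natCast]
    simp [List.length_take]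
    omega
  · rw [show PySem.Int.floordiv (((a :: b :: rest).length : Int)) 2
        = (((a :: b :: rest).length / 2 : Nat) : Int) by
        exact_mod_cast PySem.Int.floordiv_natCast (a :: b :: rest).length 2,
      PySem.List.slice_from_natCast]
    simp [List.length_drop]
    omega

def multinomial_2_alt (l : List Int) : Int :=
  if (multinomial_2_ok l 0 0).1 then 1 else 0

-- ===== PRECONDITION & SPEC =====
def Spec_multinomial_2 (l : List Int) (out : Int) : Prop := out = multinomial_2_alt l
instance (l : List Int) (out : Int) : Decidable (Spec_multinomial_2 l out) := by unfold Spec_multinomial_2; infer_instance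

-- ===== CLAIM (what is proved, stated in full; the proofs are below) =====
def Claim_equal_multinomial_2 : Prop := ∀ (l : List Int), Dom_multinomial_2 l → Spec_multinomial_2 l (multinomial_2 l)

-- ===== LEMMAS AND PROOFS =====

-- A's loop returns only 0 or 1
theorem multinomial_2_loop01 (l : List Int) : ∀ (bo s : Int),
    multinomial_2_loop bo s l = 0 ∨ multinomial_2_loop bo s l = 1 := by
  induction l with
  | nil => intro bo s; right; rfl
  | cons v rest ih =>
    intro bo s
    simp only [multinomial_2_loop]
    split_ifs
    · left; rfl
    · exact ih _ _

-- A's loop over a concatenation: run the first part, then (if it survived) the second from the final state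
theorem multinomial_2_loop_append (xs : List Int) : ∀ (ys : List Int) (bo s : Int),
    multinomial_2_loop bo s (xs ++ ys) =
      if multinomial_2_loop bo s xs = 0 then 0
      else multinomial_2_loop (xs.foldl PySem.Int.bor bo) (s + xs.sum) ys := by
  induction xs with
  | nil => intro ys bo s; simp [multinomial_2_loop]
  | cons v xs ih =>
    intro ys bo s
    by_cases h : PySem.Int.bor bo v < s + v
    · simp [multinomial_2_loop, h]
    · simp only [List.cons_append, multinomial_2_loop, if_neg h]
      rw [ih]
      simp only [List.foldl_cons, List.sum_cons]
      have hs : s + (v + xs.sum) = s + v + xs.sum := by ring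
      rw [hs]

-- B's recursion computes exactly A's loop verdict, and on success the final state
theorem multinomial_2_ok_spec (n : Nat) : ∀ (seg : List Int), seg.length = n → ∀ (s o : Int),
    ((multinomial_2_ok seg s o).1 = true ↔ multinomial_2_loop o s seg = 1) ∧
    ((multinomial_2_ok seg s o).1 = true →
      (multinomial_2_ok seg s o).2.1 = s + seg.sum ∧
      (multinomial_2_ok seg s o).2.2 = seg.foldl PySem.Int.bor o) := by
  induction n using Nat.strong_induction_on with
  | _ n ih =>
    intro seg hn s o
    match seg with
    | [] =>
      simp [multinomial_2_ok, multinomial_2_loop]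
    | [v] =>
      constructor
      · simp only [multinomial_2_ok, multinomial_2_loop]
        by_cases h : PySem.Int.bor o v < s + v
        · simp [h, not_le.mpr h]
        · simp [h, not_lt.mp h]
      · intro _
        simp [multinomial_2_ok]
    | a :: b :: rest =>
      have hlen : (a :: b :: rest).length = n := hn
      have hn2 : 2 ≤ n := by simp at hlen; omega
      have hm : PySem.Int.floordiv (((a :: b :: rest).length : Int)) 2
          = ((n / 2 : Nat) : Int) := by
        rw [hlen]; exact_mod_cast PySem.Int.floordiv_natCast n 2
      have hsl : PySem.List.slice (a :: b :: rest) none (some ((n / 2 : Nat) : Int))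
          = (a :: b :: rest).take (n / 2) := PySem.List.slice_to_natCast _ _
      have hsr : PySem.List.slice (a :: b :: rest) (some ((n / 2 : Nat) : Int)) none
          = (a :: b :: rest).drop (n / 2) := PySem.List.slice_from_natCast _ _
      have hlt : ((a :: b :: rest).take (n / 2)).length < n := by
        simp [List.length_take, hlen]; omega
      have hld : ((a :: b :: rest).drop (n / 2)).length < n := by
        simp [List.length_drop, hlen]; omega
      have ihl := ih _ hlt ((a :: b :: rest).take (n / 2)) rfl s o
      have happ := multinomial_2_loop_append ((a :: b :: rest).take (n / 2))
        ((a :: b :: rest).drop (n / 2)) o s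
      rw [List.take_append_drop] at happ
      simp only [multinomial_2_ok]
      rw [hm, hsl, hsr]
      by_cases h1 : (multinomial_2_ok ((a :: b :: rest).take (n / 2)) s o).1 = true
      · have hl1 : multinomial_2_loop o s ((a :: b :: rest).take (n / 2)) = 1 :=
          (ihl.1).mp h1
        obtain ⟨hs', ho'⟩ := ihl.2 h1
        have ihr := ih _ hld ((a :: b :: rest).drop (n / 2)) rfl
          (s + ((a :: b :: rest).take (n / 2)).sum)
          (((a :: b :: rest).take (n / 2)).foldl PySem.Int.bor o)
        simp only [h1, if_true]
        rw [happ, hl1]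
        simp only [one_ne_zero, if_false]
        rw [hs', ho']
        refine ⟨ihr.1, fun hg => ?_⟩
        obtain ⟨hA, hB⟩ := ihr.2 hg
        constructor
        · rw [hA]
          have := List.take_append_drop (n / 2) (a :: b :: rest)
          calc s + ((a :: b :: rest).take (n / 2)).sum + ((a :: b :: rest).drop (n / 2)).sum
              = s + (((a :: b :: rest).take (n / 2)) ++ ((a :: b :: rest).drop (n / 2))).sum := by
                rw [List.sum_append]; ring
            _ = s + (a :: b :: rest).sum := by rw [this]
        · rw [hB]
          have := List.take_append_drop (n / 2) (a :: b :: rest)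
          calc (((a :: b :: rest).drop (n / 2)).foldl PySem.Int.bor
                (((a :: b :: rest).take (n / 2)).foldl PySem.Int.bor o))
              = ((((a :: b :: rest).take (n / 2)) ++ ((a :: b :: rest).drop (n / 2))).foldl PySem.Int.bor o) := by
                rw [List.foldl_append]
            _ = (a :: b :: rest).foldl PySem.Int.bor o := by rw [this]
      · have hl0 : multinomial_2_loop o s ((a :: b :: rest).take (n / 2)) = 0 := by
          rcases multinomial_2_loop01 ((a :: b :: rest).take (n / 2)) o s with h | h
          · exact h
          · exact absurd (ihl.1.mpr h) h1
        simp only [h1]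
        rw [happ, hl0]
        simp

-- ===== VERDICT (by name: the statement is the Claim_ definition above) =====
theorem multinomial_2_spec : Claim_equal_multinomial_2 := by
  intro l _
  unfold Spec_multinomial_2 multinomial_2 multinomial_2_alt
  have h := (multinomial_2_ok_spec l.length l rfl 0 0).1
  by_cases hb : (multinomial_2_ok l 0 0).1 = true
  · rw [if_pos hb, h.mp hb]
  · rw [if_neg hb]
    rcases multinomial_2_loop01 l 0 0 with h0 | h0
    · exact h0
    · exact absurd (h.mpr h0) hb
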